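-- pv_equiv track=rewrite | github.com/volkanozyildirim/crew-ai | agile_sdlc_crew/src/agile_sdlc_crew/pipeline.py | extract_relevant_section
-- ===== SOURCE A (Python) =====
-- def extract_relevant_section(
--     full_content: str,
--     keywords: list[str],
--     context_lines: int = 30,
-- ) -> tuple[str, int, int]:
--     """Dosya iceriginden anahtar kelimelere en yakin bolumu cikarir.
--     Returns: (section_text, start_line, end_line)
--     """
--     lines = full_content.split("\n")
--     if not lines:
--         return full_content, 0, 0
--
--     # Anahtar kelimelerin gectiği satirlari bul
--     match_lines = set()
--     for i, line in enumerate(lines):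
--         line_lower = line.lower()
--         for kw in keywords:
--             if kw.lower() in line_lower:
--                 match_lines.add(i)
--
--     if not match_lines:
--         return "\n".join(lines[:80]), 0, min(80, len(lines))
--
--     min_line = max(0, min(match_lines) - context_lines)
--     max_line = min(len(lines), max(match_lines) + context_lines)
--     section = "\n".join(lines[min_line:max_line])
--     return section, min_line, max_line
-- ===== SOURCE B (Python) =====
-- def extract_relevant_section(
--     full_content: str,
--     keywords: list[str],
--     context_lines: int = 30,
-- ) -> tuple[str, int, int]:
--     """Extract the section of full_content around keyword-matching lines.
--
--     Two early-terminating scans (front-to-back for the first match, back-to-front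
--     for the last) replace A's collect-all-matches pass.
--     """
--     lines = full_content.split("\n")
--     lowered = [kw.lower() for kw in keywords]
--
--     first = None
--     for i, line in enumerate(lines):
--         ll = line.lower()
--         if any(kw in ll for kw in lowered):
--             first = i
--             break
--
--     if first is None:
--         return "\n".join(lines[:80]), 0, min(80, len(lines))
--
--     last = first
--     for k, line in enumerate(reversed(lines)):
--         ll = line.lower()
--         if any(kw in ll for kw in lowered):
--             last = len(lines) - 1 - k
--             break
--
--     min_line = max(0, first - context_lines)
--     max_line = min(len(lines), last + context_lines)
--     return "\n".join(lines[min_line:max_line]), min_line, max_line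
-- ===== Notes on version B (the rewrite author's own statement) =====
-- stated objective: faster
-- what changed: A collects every matching line index into a set in one full pass over all lines x keywords and then takes min/max of that set; B never builds the set: it scans lines front-to-back stopping at the first keyword match, and back-to-front stopping at the last, then slices with the same context formula.
import Mathlib
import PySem

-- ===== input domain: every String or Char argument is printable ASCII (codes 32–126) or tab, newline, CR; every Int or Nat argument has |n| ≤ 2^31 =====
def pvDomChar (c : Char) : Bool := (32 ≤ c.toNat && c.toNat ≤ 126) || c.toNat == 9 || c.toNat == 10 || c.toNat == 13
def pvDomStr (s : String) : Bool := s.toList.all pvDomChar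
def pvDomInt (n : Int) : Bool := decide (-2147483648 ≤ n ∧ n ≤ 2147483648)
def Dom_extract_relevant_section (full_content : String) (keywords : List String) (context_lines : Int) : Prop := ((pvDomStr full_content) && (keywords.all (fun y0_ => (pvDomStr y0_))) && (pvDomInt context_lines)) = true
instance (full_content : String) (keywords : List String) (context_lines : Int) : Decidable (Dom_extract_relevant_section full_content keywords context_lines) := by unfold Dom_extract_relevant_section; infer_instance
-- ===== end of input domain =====

-- B replaces A's collect-all-match-indices set (then min/max) by two early-terminating scans —
-- front-to-back for the first matching line, back-to-front for the last (objective: alternative).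

-- ===== PORT A =====
-- A collects every matching line index into a set, then takes min/max of the set.
def extract_relevant_section (full_content : String) (keywords : List String) (context_lines : Int) : String × Int × Int :=
  let lines := (PySem.Str.split? full_content "\n").getD []
  if lines = [] then (full_content, 0, 0)
  else
    let match_lines : PySem.Set Int :=
      (PySem.List.enumerate lines 0).foldl (fun s p =>
        let line_lower := PySem.Str.lower p.2
        keywords.foldl (fun s kw =>
          if PySem.Str.isIn (PySem.Str.lower kw) line_lower then PySem.Set.add s p.1 else s) s)
        PySem.Set.empty
    if match_lines = [] then
      (PySem.Str.join "\n" (PySem.List.slice lines none (some 80)), 0, min 80 (lines.length : Int))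
    else
      let min_line := max 0 ((PySem.List.min? match_lines (fun x => x)).getD 0 - context_lines)
      let max_line := min (lines.length : Int) ((PySem.List.max? match_lines (fun x => x)).getD 0 + context_lines)
      (PySem.Str.join "\n" (PySem.List.slice lines (some min_line) (some max_line)), min_line, max_line)

-- ===== PORT B =====
-- B's helper: does this line contain one of the (pre-lowered) keywords?
def pvHitB (lowered : List String) (line : String) : Bool :=
  let ll := PySem.Str.lower line
  lowered.any (fun kw => PySem.Str.isIn kw ll)

-- B's front-to-back scan with break: offset of the first matching line.
def pvFirstHit (lowered : List String) : List String → Option Int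
  | [] => none
  | l :: ls => if pvHitB lowered l then some 0 else (pvFirstHit lowered ls).map (· + 1)

def extract_relevant_section_alt (full_content : String) (keywords : List String) (context_lines : Int) : String × Int × Int :=
  let lines := (PySem.Str.split? full_content "\n").getD []
  let lowered := keywords.map PySem.Str.lower
  match pvFirstHit lowered lines with
  | none => (PySem.Str.join "\n" (PySem.List.slice lines none (some 80)), 0, min 80 (lines.length : Int))
  | some f =>
    let first : Int := f
    -- back-to-front scan with break (Source B enumerates reversed(lines))
    let last : Int :=
      match pvFirstHit lowered lines.reverse with
      | none => first
      | some k => (lines.length : Int) - 1 - k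
    let min_line := max 0 (first - context_lines)
    let max_line := min (lines.length : Int) (last + context_lines)
    (PySem.Str.join "\n" (PySem.List.slice lines (some min_line) (some max_line)), min_line, max_line)

-- ===== PRECONDITION & SPEC =====
def Spec_extract_relevant_section (full_content : String) (keywords : List String) (context_lines : Int) (out : String × Int × Int) : Prop := out = extract_relevant_section_alt full_content keywords context_lines
instance (full_content : String) (keywords : List String) (context_lines : Int) (out : String × Int × Int) : Decidable (Spec_extract_relevant_section full_content keywords context_lines out) := by unfold Spec_extract_relevant_section; infer_instance

-- ===== CLAIM (what is proved, stated in full; the proofs are below) =====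
def Claim_equal_extract_relevant_section : Prop := ∀ (full_content : String) (keywords : List String) (context_lines : Int), Dom_extract_relevant_section full_content keywords context_lines → Spec_extract_relevant_section full_content keywords context_lines (extract_relevant_section full_content keywords context_lines)

-- ===== LEMMAS AND PROOFS =====

-- the common match predicate, in A's phrasing
def pvHitA (keywords : List String) (line : String) : Bool :=
  keywords.any (fun kw => PySem.Str.isIn (PySem.Str.lower kw) (PySem.Str.lower line))

theorem pvHitB_eq (keywords : List String) (line : String) :
    pvHitB (keywords.map PySem.Str.lower) line = pvHitA keywords line := by
  simp [pvHitB, pvHitA, List.any_map, Function.comp_def]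

-- the list of matching indices, in order
def pvMatches (keywords : List String) : List String → Int → List Int
  | [], _ => []
  | l :: ls, i =>
    if pvHitA keywords l then i :: pvMatches keywords ls (i + 1) else pvMatches keywords ls (i + 1)

-- A's inner keyword loop adds i iff some keyword matches
theorem pvInner_fold (keywords : List String) (ll : String) (s : PySem.Set Int) (i : Int) :
    keywords.foldl (fun s kw =>
      if PySem.Str.isIn (PySem.Str.lower kw) ll then PySem.Set.add s i else s) s
    = if keywords.any (fun kw => PySem.Str.isIn (PySem.Str.lower kw) ll) then PySem.Set.add s i else s := by
  induction keywords generalizing s with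
  | nil => simp
  | cons k ks ih =>
    rw [List.foldl_cons, List.any_cons]
    by_cases h : PySem.Str.isIn (PySem.Str.lower k) ll = true
    · rw [if_pos h, ih, h, Bool.true_or, if_pos rfl]
      split
      · exact PySem.Set.add_of_mem (by simp [PySem.Set.mem_add])
      · rfl
    · have h' : PySem.Str.isIn (PySem.Str.lower k) ll = false := by simpa using h
      rw [if_neg h, ih, h', Bool.false_or]

-- A's outer loop builds exactly the ordered list of match indices
theorem pvOuter_fold (keywords : List String) (lines : List String) (i : Int) (s : PySem.Set Int)
    (hs : ∀ x ∈ s, x < i) :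
    (PySem.List.enumerate lines i).foldl (fun s p =>
        keywords.foldl (fun s kw =>
          if PySem.Str.isIn (PySem.Str.lower kw) (PySem.Str.lower p.2) then PySem.Set.add s p.1 else s) s)
      s = s ++ pvMatches keywords lines i := by
  induction lines generalizing i s with
  | nil => simp [PySem.List.enumerate_nil, pvMatches]
  | cons l ls ih =>
    simp only [PySem.List.enumerate_cons, List.foldl_cons]
    rw [pvInner_fold]
    have hnotmem : i ∉ s := fun hm => absurd (hs i hm) (lt_irrefl i)
    by_cases h : pvHitA keywords l = true
    · have h' : (keywords.any fun kw => PySem.Str.isIn (PySem.Str.lower kw) (PySem.Str.lower l)) = true := h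
      rw [if_pos h', PySem.Set.add_of_not_mem hnotmem]
      have hb : ∀ x ∈ s ++ [i], x < i + 1 := by
        intro x hx
        rcases List.mem_append.mp hx with h1 | h1
        · have := hs x h1; omega
        · simp at h1; omega
      rw [ih (i + 1) (s ++ [i]) hb]
      simp only [pvMatches, h, if_pos, List.append_assoc, List.singleton_append]
    · have h' : (keywords.any fun kw => PySem.Str.isIn (PySem.Str.lower kw) (PySem.Str.lower l)) = false := by
        simpa [pvHitA] using h
      rw [h', if_neg (by simp)]
      have hb : ∀ x ∈ s, x < i + 1 := fun x hx => by have := hs x hx; omega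
      rw [ih (i + 1) s hb]
      simp [pvMatches, h]

theorem pvMatches_ge (keywords : List String) (ls : List String) (i : Int) :
    ∀ x ∈ pvMatches keywords ls i, i ≤ x := by
  induction ls generalizing i with
  | nil => simp [pvMatches]
  | cons l ls ih =>
    intro x hx
    simp only [pvMatches] at hx
    split at hx
    · rcases List.mem_cons.mp hx with h | h
      · omega
      · have := ih (i + 1) x h; omega
    · have := ih (i + 1) x hx; omega

-- head of the match list = B's forward scan
theorem pvHead_matches (keywords : List String) (ls : List String) (i : Int) :
    (pvMatches keywords ls i).head? =
      (pvFirstHit (keywords.map PySem.Str.lower) ls).map (fun k => i + k) := by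
  induction ls generalizing i with
  | nil => simp [pvMatches, pvFirstHit]
  | cons l ls ih =>
    simp only [pvFirstHit, pvHitB_eq]
    by_cases h : pvHitA keywords l = true
    · simp only [pvMatches, h, if_true, List.head?_cons, Option.map_some]
      norm_num
    · simp only [pvMatches, h, Bool.false_eq_true, if_false, ih, Option.map_map]
      congr 1
      funext k
      simp only [Function.comp_apply]
      ring

theorem pvMatches_append (keywords : List String) (xs ys : List String) (i : Int) :
    pvMatches keywords (xs ++ ys) i = pvMatches keywords xs i ++ pvMatches keywords ys (i + xs.length) := by
  induction xs generalizing i with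
  | nil => simp [pvMatches]
  | cons x xs ih =>
    have he : i + 1 + (xs.length : Int) = i + ((x :: xs).length : Int) := by simp only [List.length_cons]; push_cast; ring
    rw [List.cons_append]
    simp only [pvMatches]
    rw [ih, he]
    split <;> simp

-- last of the match list = B's backward scan
theorem pvLast_matches (keywords : List String) (ls : List String) (i : Int) :
    (pvMatches keywords ls i).getLast? =
      (pvFirstHit (keywords.map PySem.Str.lower) ls.reverse).map
        (fun k => i + (ls.length : Int) - 1 - k) := by
  induction ls using List.reverseRecOn generalizing i with
  | nil => simp [pvMatches, pvFirstHit]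
  | append_singleton xs l ih =>
    rw [pvMatches_append, List.reverse_append]
    simp only [List.reverse_singleton, List.singleton_append, pvFirstHit, pvHitB_eq]
    by_cases h : pvHitA keywords l = true
    · simp only [pvMatches, h, if_true, List.getLast?_append]
      simp only [List.getLast?_cons, List.getLast?_nil, Option.getD_none,
        Option.some_or, Option.map_some, List.length_append, List.length_cons, List.length_nil]
      congr 1
      push_cast
      ring
    · simp only [pvMatches, h, Bool.false_eq_true, if_false, List.append_nil, ih, Option.map_map]
      congr 1
      funext k
      simp only [Function.comp_apply, List.length_append, List.length_cons, List.length_nil]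
      push_cast
      ring

-- the match list is strictly increasing
theorem pvMatches_pairwise (keywords : List String) (ls : List String) (i : Int) :
    (pvMatches keywords ls i).Pairwise (· < ·) := by
  induction ls generalizing i with
  | nil => simp [pvMatches]
  | cons l ls ih =>
    simp only [pvMatches]
    split
    · exact List.pairwise_cons.mpr ⟨fun x hx => lt_of_lt_of_le (by omega) (pvMatches_ge _ _ _ x hx), ih (i + 1)⟩
    · exact ih (i + 1)

-- min of a strictly increasing nonempty list is its head
theorem pvMin_of_pairwise (m : Int) (t : List Int) (h : (m :: t).Pairwise (· < ·)) :
    (PySem.List.min? (m :: t) (fun x => x)).getD 0 = m := by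
  rw [PySem.List.min?_id_cons]
  have hle : ∀ y ∈ t, m ≤ y := fun y hy => le_of_lt ((List.pairwise_cons.mp h).1 y hy)
  have h1 := PySem.List.foldl_min_le t m
  have h2 := PySem.List.foldl_min_mem t m
  rcases h2 with h2 | h2
  · simp [h2]
  · have := hle _ h2
    have := h1.1
    simp; omega

-- every element of a strictly increasing list is ≤ its last element
theorem pvLe_getLast (l : List Int) (h : l.Pairwise (· < ·)) (y : Int) (hy : y ∈ l) (hne : l ≠ []) :
    y ≤ l.getLast hne := by
  induction l with
  | nil => cases hy
  | cons x xs ih =>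
    cases xs with
    | nil =>
      simp at hy
      simp [hy, List.getLast]
    | cons a as =>
      rw [List.getLast_cons (by simp)]
      rcases List.mem_cons.mp hy with heq | hy'
      · have hlt := (List.pairwise_cons.mp h).1 _ (List.getLast_mem (l := a :: as) (by simp))
        omega
      · exact ih (List.pairwise_cons.mp h).2 hy' (by simp)

-- max of a strictly increasing nonempty list is its last element
theorem pvMax_of_pairwise (m : Int) (t : List Int) (h : (m :: t).Pairwise (· < ·)) :
    (PySem.List.max? (m :: t) (fun x => x)).getD 0 = (m :: t).getLast (by simp) := by
  rw [PySem.List.max?_id_cons]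
  have hmem := PySem.List.foldl_max_mem t m
  have hmax := PySem.List.le_foldl_max t m
  have hlast_mem : (m :: t).getLast (by simp) ∈ m :: t := List.getLast_mem _
  have hsorted : ∀ y ∈ m :: t, y ≤ (m :: t).getLast (by simp) := by
    intro y hy
    exact pvLe_getLast _ h y hy _
  have hfold_mem : t.foldl max m ∈ m :: t := by
    rcases hmem with h1 | h1
    · simp [h1]
    · exact List.mem_cons_of_mem _ h1
  have h1 : t.foldl max m ≤ (m :: t).getLast (by simp) := hsorted _ hfold_mem
  have h2 : (m :: t).getLast (by simp) ≤ t.foldl max m := by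
    rcases List.mem_cons.mp hlast_mem with h3 | h3
    · rw [h3]; exact hmax.1
    · exact hmax.2 _ h3
  simp; omega

-- split("\n") never yields the empty list
theorem pvGo_ne_nil (sep : List Char) (fuel : Nat) (l cur : List Char) (acc : List (List Char)) :
    PySem.Chars.splitOn.go sep fuel l cur acc ≠ [] := by
  induction fuel generalizing l cur acc with
  | zero => simp [PySem.Chars.splitOn.go]
  | succ n ih =>
    match l with
    | [] => simp [PySem.Chars.splitOn.go]
    | c :: rest =>
      rw [PySem.Chars.splitOn.go]
      split
      · exact ih _ _ _
      · exact ih _ _ _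

theorem pvSplit_ne_nil (s : String) : (PySem.Str.split? s "\n").getD [] ≠ [] := by
  simp [PySem.Str.split?, PySem.Chars.split?, PySem.Chars.splitOn]
  exact fun h => pvGo_ne_nil _ _ _ _ _ (by simpa using congrArg (List.map String.ofList) h)

-- ===== VERDICT (by name: the statement is the Claim_ definition above) =====
theorem extract_relevant_section_spec : Claim_equal_extract_relevant_section := by
  intro full_content keywords context_lines _
  unfold Spec_extract_relevant_section extract_relevant_section extract_relevant_section_alt
  set lines := (PySem.Str.split? full_content "\n").getD [] with hlines
  have hne : lines ≠ [] := pvSplit_ne_nil full_content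
  rw [if_neg hne]
  have hset : (PySem.List.enumerate lines 0).foldl (fun s p =>
        keywords.foldl (fun s kw =>
          if PySem.Str.isIn (PySem.Str.lower kw) (PySem.Str.lower p.2) then PySem.Set.add s p.1 else s) s)
      PySem.Set.empty = pvMatches keywords lines 0 := by
    simpa using pvOuter_fold keywords lines 0 PySem.Set.empty (by simp [PySem.Set.empty])
  rw [hset]
  rcases hm : pvMatches keywords lines 0 with _ | ⟨m, t⟩
  · -- no match: B's forward scan finds nothing
    have hf : pvFirstHit (keywords.map PySem.Str.lower) lines = none := by
      have hh := pvHead_matches keywords lines 0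
      rw [hm] at hh
      cases hfh : pvFirstHit (keywords.map PySem.Str.lower) lines
      · rfl
      · rw [hfh] at hh; simp at hh
    simp [hf]
  · -- at least one match
    have hpw := pvMatches_pairwise keywords lines 0
    rw [hm] at hpw
    have hhead := pvHead_matches keywords lines 0
    rw [hm] at hhead
    cases hf : pvFirstHit (keywords.map PySem.Str.lower) lines with
    | none => rw [hf] at hhead; simp at hhead
    | some f =>
      rw [hf] at hhead
      simp only [List.head?_cons, Option.map_some] at hhead
      have hfm : m = 0 + f := Option.some.inj hhead
      have hlastm := pvLast_matches keywords lines 0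
      rw [hm] at hlastm
      cases hg : pvFirstHit (keywords.map PySem.Str.lower) lines.reverse with
      | none => rw [hg] at hlastm; simp at hlastm
      | some k =>
        rw [hg] at hlastm
        simp only [Option.map_some] at hlastm
        have hlast : ∀ hh : (m :: t) ≠ [], (m :: t).getLast hh = 0 + (lines.length : Int) - 1 - k := by
          intro hh
          rw [List.getLast?_eq_some_getLast hh] at hlastm
          exact Option.some.inj hlastm
        simp only [hf, hg]
        rw [if_neg (by simp : ¬(m :: t = []))]
        rw [pvMin_of_pairwise m t hpw, pvMax_of_pairwise m t hpw, hlast, hfm]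
        norm_num
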